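-- pv_equiv track=rewrite | github.com/ShuvalovAnthony/ez_python | Alexander_/23/76238.py | f
-- ===== SOURCE A (Python) =====
-- def f(start, stop, canAdd2=True):
--     if start > stop: return 0
--     if start == stop: return 1
--
--     moves = [
--         f(start + 1, stop, True),
--         f(start*2, stop, True)
--     ]
--
--     if canAdd2:
--         moves.append(f(start + 2, stop, False))
--
--     return sum(moves)
-- ===== SOURCE B (Python) =====
-- def f(start, stop, canAdd2=True):
--     # Memoized top-down recursion on the (position, canAdd2) state.
--     memo = {}
--
--     def go(s, c):
--         if s > stop:
--             return 0
--         if s == stop: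
--             return 1
--         key = (s, c)
--         if key in memo:
--             return memo[key]
--         r = go(s + 1, True) + go(s * 2, True) + (go(s + 2, False) if c else 0)
--         memo[key] = r
--         return r
--
--     return go(start, canAdd2)
-- ===== Notes on version B (the rewrite author's own statement) =====
-- stated objective: alternative
-- what changed: Replaced A's naive exponential three-way recursion by a memoized recursion on the (position, canAdd2) state, so each state is computed once.
import Mathlib
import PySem

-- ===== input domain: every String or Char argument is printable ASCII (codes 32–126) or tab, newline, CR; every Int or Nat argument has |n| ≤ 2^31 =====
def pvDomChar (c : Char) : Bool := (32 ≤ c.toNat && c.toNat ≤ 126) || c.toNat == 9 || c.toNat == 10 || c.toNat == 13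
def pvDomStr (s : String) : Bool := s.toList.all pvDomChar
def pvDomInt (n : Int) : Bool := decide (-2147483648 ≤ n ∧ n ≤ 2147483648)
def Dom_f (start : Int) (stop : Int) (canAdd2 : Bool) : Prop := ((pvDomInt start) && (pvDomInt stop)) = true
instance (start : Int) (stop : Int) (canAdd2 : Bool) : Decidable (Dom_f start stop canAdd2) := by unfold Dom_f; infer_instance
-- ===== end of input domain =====

-- B replaces A's exponential three-way recursion by a memoized recursion on the (position, canAdd2)
-- state, computing each state once; on inputs outside Pre_f both Pythons recurse forever and raise.

-- ===== PORT A =====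
-- A's recursion diverges for start ≤ 0 < stop (start*2 never progresses); the fuel only
-- makes the same computation total, and inside Pre_f it is always sufficient (proved below).
def fA : Nat → Int → Int → Bool → Int
  | 0, _, _, _ => 0
  | Nat.succ n, start, stop, canAdd2 =>
    if start > stop then 0
    else if start = stop then 1
    else
      let moves := [fA n (start + 1) stop true, fA n (start * 2) stop true]
      let moves := if canAdd2 then moves ++ [fA n (start + 2) stop false] else moves
      moves.sum

def f (start : Int) (stop : Int) (canAdd2 : Bool) : Int :=
  fA ((stop - start).toNat + 1) start stop canAdd2

-- ===== PORT B =====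
-- Source B's inner `go`, with the memo dict threaded explicitly and fuel for totality
-- (inside Pre_f the fuel is always sufficient, proved below).
def goB (stop : Int) : Nat → Int → Bool → PySem.Dict (Int × Bool) Int → Int × PySem.Dict (Int × Bool) Int
  | 0, _, _, m => (0, m)
  | Nat.succ n, s, c, m =>
    if s > stop then (0, m)
    else if s = stop then (1, m)
    else
      match m.get? (s, c) with
      | some v => (v, m)
      | none =>
        let p1 := goB stop n (s + 1) true m
        let p2 := goB stop n (s * 2) true p1.2
        if c then
          let p3 := goB stop n (s + 2) false p2.2
          let r := p1.1 + p2.1 + p3.1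
          (r, p3.2.insert (s, c) r)
        else
          let r := p1.1 + p2.1
          (r, p2.2.insert (s, c) r)

def f_alt (start : Int) (stop : Int) (canAdd2 : Bool) : Int :=
  (goB stop ((stop - start).toNat + 1) start canAdd2 PySem.Dict.empty).1

-- ===== PRECONDITION & SPEC =====
-- Pre_f excludes start < stop with start ≤ 0, where both Pythons recurse forever on
-- f(start*2, …) and raise RecursionError; it admits every input on which A returns.
def Pre_f (start : Int) (stop : Int) (canAdd2 : Bool) : Prop := stop ≤ start ∨ 1 ≤ start
instance (start : Int) (stop : Int) (canAdd2 : Bool) : Decidable (Pre_f start stop canAdd2) := by unfold Pre_f; infer_instance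
def pvWitness_f : Int × Int × Bool := (1, 5, true)

def Spec_f (start : Int) (stop : Int) (canAdd2 : Bool) (out : Int) : Prop := out = f_alt start stop canAdd2
instance (start : Int) (stop : Int) (canAdd2 : Bool) (out : Int) : Decidable (Spec_f start stop canAdd2 out) := by unfold Spec_f; infer_instance

-- ===== CLAIM (what is proved, stated in full; the proofs are below) =====
def Claim_equal_f : Prop := ∀ (start : Int) (stop : Int) (canAdd2 : Bool), Dom_f start stop canAdd2 → Pre_f start stop canAdd2 → Spec_f start stop canAdd2 (f start stop canAdd2)

-- ===== LEMMAS AND PROOFS =====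

-- fuel irrelevance for A's port: any sufficient fuel gives the same value (inside Pre_)
theorem fA_fuel (n : Nat) : ∀ (m : Nat) (u stop : Int) (b : Bool),
    (stop - u).toNat < n → (stop - u).toNat < m → (1 ≤ u ∨ stop ≤ u) →
    fA n u stop b = fA m u stop b := by
  induction n with
  | zero => intro m u stop b h; omega
  | succ k ih =>
    intro m u stop b hn hm hu
    cases m with
    | zero => omega
    | succ m' =>
      show fA (k+1) u stop b = fA (m'+1) u stop b
      simp only [fA]
      by_cases h1 : u > stop
      · simp [h1]
      · simp only [if_neg h1]
        by_cases h2 : u = stop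
        · simp [h2]
        · have hu1 : 1 ≤ u := by rcases hu with h | h; exact h; omega
          simp only [if_neg h2]
          have e1 : fA k (u+1) stop true = fA m' (u+1) stop true :=
            ih m' (u+1) stop true (by omega) (by omega) (by omega)
          have e2 : fA k (u*2) stop true = fA m' (u*2) stop true :=
            ih m' (u*2) stop true (by omega) (by omega) (by omega)
          have e3 : fA k (u+2) stop false = fA m' (u+2) stop false :=
            ih m' (u+2) stop false (by omega) (by omega) (by omega)
          cases b <;> simp [e1, e2, e3]

theorem f_gt (u stop : Int) (b : Bool) (h : stop < u) : f u stop b = 0 := by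
  simp [f, fA, h]

theorem f_eq_stop (stop : Int) (b : Bool) : f stop stop b = 1 := by
  simp [f, fA]

-- A's recurrence, phrased through f
theorem f_rec (u stop : Int) (hu : 1 ≤ u) (hlt : u < stop) :
    f u stop false = f (u+1) stop true + f (u*2) stop true ∧
    f u stop true = f (u+1) stop true + f (u*2) stop true + f (u+2) stop false := by
  have e1 : fA ((stop - u).toNat) (u+1) stop true = f (u+1) stop true :=
    fA_fuel _ _ _ _ _ (by omega) (by omega) (by omega)
  have e2 : fA ((stop - u).toNat) (u*2) stop true = f (u*2) stop true :=
    fA_fuel _ _ _ _ _ (by omega) (by omega) (by omega)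
  have e3 : fA ((stop - u).toNat) (u+2) stop false = f (u+2) stop false :=
    fA_fuel _ _ _ _ _ (by omega) (by omega) (by omega)
  constructor <;>
  · show fA ((stop - u).toNat + 1) u stop _ = _
    simp only [fA, if_neg (by omega : ¬ u > stop), if_neg (by omega : ¬ u = stop)]
    simp [e1, e2, e3, add_assoc]

-- the memo invariant: every stored entry is f's value for its state
def MemoOK (stop : Int) (m : PySem.Dict (Int × Bool) Int) : Prop :=
  ∀ (k : Int) (c : Bool) (v : Int), m.get? (k, c) = some v → v = f k stop c

-- with sufficient fuel and a correct memo, goB returns f's value and keeps the memo correct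
theorem goB_correct (stop : Int) (n : Nat) : ∀ (s : Int) (c : Bool) (m : PySem.Dict (Int × Bool) Int),
    (stop - s).toNat < n → (1 ≤ s ∨ stop ≤ s) → MemoOK stop m →
    (goB stop n s c m).1 = f s stop c ∧ MemoOK stop (goB stop n s c m).2 := by
  induction n with
  | zero => intro s c m h; omega
  | succ k ih =>
    intro s c m hn hs hm
    by_cases h1 : s > stop
    · simp only [goB, if_pos h1]; exact ⟨(f_gt s stop c h1).symm, hm⟩
    · by_cases h2 : s = stop
      · subst h2
        simp only [goB, if_neg h1]
        exact ⟨(f_eq_stop s c).symm, hm⟩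
      · have hs1 : 1 ≤ s := by rcases hs with h | h; exact h; omega
        have hlt : s < stop := by omega
        simp only [goB, if_neg h1, if_neg h2]
        cases hget : m.get? (s, c) with
        | some v => exact ⟨hm s c v hget, hm⟩
        | none =>
          simp only []
          have h1' := ih (s+1) true m (by omega) (by omega) hm
          have h2' := ih (s*2) true (goB stop k (s+1) true m).2 (by omega) (by omega) h1'.2
          cases c with
          | false =>
            simp only [Bool.false_eq_true, if_false]
            refine ⟨?_, ?_⟩
            · rw [h1'.1, h2'.1, (f_rec s stop hs1 hlt).1]
            · intro a b v hv
              rw [PySem.Dict.get?_insert] at hv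
              by_cases hk : (a, b) = (s, false)
              · rw [if_pos hk] at hv
                rw [Prod.mk.injEq] at hk
                cases hv
                rw [hk.1, hk.2, h1'.1, h2'.1, (f_rec s stop hs1 hlt).1]
              · rw [if_neg hk] at hv
                exact h2'.2 a b v hv
          | true =>
            simp only [if_true]
            have h3' := ih (s+2) false (goB stop k (s*2) true (goB stop k (s+1) true m).2).2
              (by omega) (by omega) h2'.2
            refine ⟨?_, ?_⟩
            · rw [h1'.1, h2'.1, h3'.1, (f_rec s stop hs1 hlt).2]
            · intro a b v hv
              rw [PySem.Dict.get?_insert] at hv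
              by_cases hk : (a, b) = (s, true)
              · rw [if_pos hk] at hv
                rw [Prod.mk.injEq] at hk
                cases hv
                rw [hk.1, hk.2, h1'.1, h2'.1, h3'.1, (f_rec s stop hs1 hlt).2]
              · rw [if_neg hk] at hv
                exact h3'.2 a b v hv

-- ===== VERDICT (by name: the statement is the Claim_ definition above) =====
theorem f_spec : Claim_equal_f := by
  intro start stop c _ hpre
  unfold Spec_f f_alt
  have hempty : MemoOK stop PySem.Dict.empty := by
    intro k c v hv
    rw [PySem.Dict.get?_empty] at hv
    exact absurd hv (by simp)
  have hs : 1 ≤ start ∨ stop ≤ start := by unfold Pre_f at hpre; omega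
  exact ((goB_correct stop ((stop - start).toNat + 1) start c PySem.Dict.empty
    (by omega) hs hempty).1).symm
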